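-- pv_equiv track=rewrite | github.com/jebreimo/Argen | Argen/generate_argument_processors.py | determine_argument_ranges
-- ===== SOURCE A (Python) =====
-- def determine_argument_ranges(counts):
--     min_count = 0
--     for lo, hi in counts:
--         if lo:
--             min_count += lo
--     result = []
--     acc_pos, acc_neg = 0, -min_count
--     start = (acc_pos, acc_neg)
--     i = 0
--     for i in range(len(counts)):
--         lo, hi = counts[i]
--         if hi is not None:
--             acc_pos += hi
--         else:
--             acc_pos = -1
--         acc_neg += lo
--         end = acc_pos, acc_neg
--         result.append((start, end))
--         start = end
--         if hi is None:
--             break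
--     i += 1
--     for i in range(i, len(counts)):
--         lo, hi = counts[i]
--         acc_neg += lo
--         end = acc_pos, acc_neg
--         result.append((start, end))
--         start = end
--
--     return result
-- ===== SOURCE B (Python) =====
-- def determine_argument_ranges(counts):
--     los = [lo for lo, hi in counts]
--     his = [hi for lo, hi in counts]
--     min_count = sum(lo for lo in los if lo)
--     k = next((i for i, h in enumerate(his) if h is None), len(counts))
--     pos = []
--     s = 0
--     for h in his[:k]:
--         s += h
--         pos.append(s)
--     pos.extend([-1] * (len(counts) - k))
--     neg = []
--     s = -min_count
--     for lo in los:
--         s += lo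
--         neg.append(s)
--     states = [(0, -min_count)] + list(zip(pos, neg))
--     return list(zip(states, states[1:]))
-- ===== Notes on version B (the rewrite author's own statement) =====
-- stated objective: alternative
-- what changed: Instead of A's single stateful pass with a break and a latched accumulator, B computes the two coordinate columns independently (a prefix-sum list of the his up to the first None padded with -1, and a prefix-sum list of the los), zips them into a state sequence and pairs consecutive states.
import Mathlib
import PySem

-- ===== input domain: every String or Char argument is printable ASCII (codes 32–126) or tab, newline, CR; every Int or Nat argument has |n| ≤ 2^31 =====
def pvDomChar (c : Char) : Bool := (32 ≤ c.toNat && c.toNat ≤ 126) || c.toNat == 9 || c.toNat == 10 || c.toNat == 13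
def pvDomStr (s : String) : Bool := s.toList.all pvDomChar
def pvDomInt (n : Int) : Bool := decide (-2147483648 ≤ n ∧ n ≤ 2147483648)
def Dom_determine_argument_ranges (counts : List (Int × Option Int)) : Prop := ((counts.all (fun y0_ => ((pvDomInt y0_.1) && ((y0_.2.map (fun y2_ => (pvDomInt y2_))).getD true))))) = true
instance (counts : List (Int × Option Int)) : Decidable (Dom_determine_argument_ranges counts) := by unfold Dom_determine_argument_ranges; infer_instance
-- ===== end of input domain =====

-- B computes the pos and neg columns as independent prefix-sum lists (pos truncated at the
-- first None and padded with -1) and zips consecutive states, instead of A's single stateful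
-- two-phase loop with a break (alternative decomposition, same cost).


-- ===== PORT A =====
-- phase 2 of A's loop: after the break, acc_pos is frozen; structural recursion over the rest
def darA_phase2 (acc_pos acc_neg : Int) (start : Int × Int) : List (Int × Option Int) → List ((Int × Int) × (Int × Int))
  | [] => []
  | (lo, _) :: rest =>
    let n := acc_neg + lo
    let e := (acc_pos, n)
    (start, e) :: darA_phase2 acc_pos n e rest

-- phase 1 of A's loop: runs until hi is None, then breaks into phase 2
def darA_phase1 (acc_pos acc_neg : Int) (start : Int × Int) : List (Int × Option Int) → List ((Int × Int) × (Int × Int))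
  | [] => []
  | (lo, hi) :: rest =>
    match hi with
    | some h =>
      let p := acc_pos + h
      let n := acc_neg + lo
      let e := (p, n)
      (start, e) :: darA_phase1 p n e rest
    | none =>
      let p := (-1 : Int)
      let n := acc_neg + lo
      let e := (p, n)
      (start, e) :: darA_phase2 p n e rest

def determine_argument_ranges (counts : List (Int × Option Int)) : List ((Int × Int) × (Int × Int)) :=
  let min_count := counts.foldl (fun m x => if x.1 ≠ 0 then m + x.1 else m) 0
  darA_phase1 0 (-min_count) (0, -min_count) counts

-- ===== PORT B =====
-- running prefix sums of a list starting from s (B's `s += x; lst.append(s)` loops)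
def darB_prefix (s : Int) : List Int → List Int
  | [] => []
  | x :: xs => (s + x) :: darB_prefix (s + x) xs

def determine_argument_ranges_alt (counts : List (Int × Option Int)) : List ((Int × Int) × (Int × Int)) :=
  let los := counts.map Prod.fst
  let his := counts.map Prod.snd
  let min_count := los.foldl (fun m lo => if lo ≠ 0 then m + lo else m) 0
  let k := his.findIdx Option.isNone
  -- his.take k contains only `some` values, so `.getD 0` is exact here
  let pos := darB_prefix 0 ((his.take k).map (fun h => h.getD 0)) ++ List.replicate (counts.length - k) (-1)
  let neg := darB_prefix (-min_count) los
  let states := ((0 : Int), -min_count) :: List.zip pos neg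
  List.zip states states.tail

-- ===== PRECONDITION & SPEC =====
def Spec_determine_argument_ranges (counts : List (Int × Option Int)) (out : List ((Int × Int) × (Int × Int))) : Prop := out = determine_argument_ranges_alt counts
instance (counts : List (Int × Option Int)) (out : List ((Int × Int) × (Int × Int))) : Decidable (Spec_determine_argument_ranges counts out) := by unfold Spec_determine_argument_ranges; infer_instance

-- ===== CLAIM (what is proved, stated in full; the proofs are below) =====
def Claim_equal_determine_argument_ranges : Prop := ∀ (counts : List (Int × Option Int)), Dom_determine_argument_ranges counts → Spec_determine_argument_ranges counts (determine_argument_ranges counts)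

-- ===== LEMMAS AND PROOFS =====

-- the pos column as a single recursion: prefix sums of the his until the first None, then -1s
def posOf (p : Int) : List (Option Int) → List Int
  | [] => []
  | some h :: rest => (p + h) :: posOf (p + h) rest
  | none :: rest => (-1) :: List.replicate rest.length (-1)

theorem posOf_eq (his : List (Option Int)) : ∀ (p : Int),
    posOf p his = darB_prefix p ((his.take (his.findIdx Option.isNone)).map (fun h => h.getD 0))
      ++ List.replicate (his.length - his.findIdx Option.isNone) (-1) := by
  induction his with
  | nil => intro p; simp [posOf, darB_prefix]
  | cons h rest ih =>
    intro p
    cases h with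
    | none => simp [posOf, List.findIdx_cons, darB_prefix, List.replicate_succ]
    | some v =>
      simp only [posOf, List.findIdx_cons, Option.isNone_some, cond_false,
        List.take_succ_cons, List.map_cons, darB_prefix, List.cons_append, List.length_cons]
      rw [ih, Nat.add_sub_add_right]; simp

theorem phase2_eq (xs : List (Int × Option Int)) : ∀ (p nacc : Int) (s : Int × Int),
    darA_phase2 p nacc s xs =
      List.zip (s :: List.zip (List.replicate xs.length p) (darB_prefix nacc (xs.map Prod.fst)))
        (List.zip (List.replicate xs.length p) (darB_prefix nacc (xs.map Prod.fst))) := by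
  induction xs with
  | nil => intro p nacc s; simp [darA_phase2, darB_prefix]
  | cons x rest ih =>
    intro p nacc s
    obtain ⟨lo, hi⟩ := x
    simp only [darA_phase2, List.map_cons, darB_prefix, List.length_cons, List.replicate_succ,
      List.zip_cons_cons]
    rw [ih]

theorem phase1_eq (xs : List (Int × Option Int)) : ∀ (p nacc : Int) (s : Int × Int),
    darA_phase1 p nacc s xs =
      List.zip (s :: List.zip (posOf p (xs.map Prod.snd)) (darB_prefix nacc (xs.map Prod.fst)))
        (List.zip (posOf p (xs.map Prod.snd)) (darB_prefix nacc (xs.map Prod.fst))) := by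
  induction xs with
  | nil => intro p nacc s; simp [darA_phase1, posOf, darB_prefix]
  | cons x rest ih =>
    intro p nacc s
    obtain ⟨lo, hi⟩ := x
    cases hi with
    | some h =>
      simp only [darA_phase1, List.map_cons, posOf, darB_prefix, List.zip_cons_cons]
      rw [ih]
    | none =>
      simp only [darA_phase1, List.map_cons, posOf, darB_prefix, List.zip_cons_cons]
      rw [phase2_eq]
      simp

-- ===== VERDICT (by name: the statement is the Claim_ definition above) =====
theorem determine_argument_ranges_spec : Claim_equal_determine_argument_ranges := by
  intro counts _
  unfold Spec_determine_argument_ranges determine_argument_ranges determine_argument_ranges_alt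
  simp only [List.foldl_map]
  rw [show counts.length = (counts.map Prod.snd).length by simp, ← posOf_eq (counts.map Prod.snd)]
  exact phase1_eq counts 0 _ _
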